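-- pv_equiv track=rewrite | github.com/AndrewShepherd/leetcode-python | min-cost-to-make-array-equalindromic/min_cost_to_make_array_equalindromic.py | decrement_list
-- ===== SOURCE A (Python) =====
-- def decrement_list(n):
--     result = n[:]
--     for i in range(len(n)-1, -1, -1):
--         if result[i] != 0:
--             result[i] -= 1
--             break
--         else:
--             result[i] = 9
--     return result
-- ===== SOURCE B (Python) =====
-- def decrement_list(n):
--     # Recursive borrow on the reversed list: leading zeros (from the right)
--     # become 9s until the first nonzero digit, which is decremented.
--     def dec_rev(r):
--         if not r:
--             return []
--         d, rest = r[0], r[1:]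
--         if d == 0:
--             return [9] + dec_rev(rest)
--         return [d - 1] + rest
--     return dec_rev(n[::-1])[::-1]
-- ===== Notes on version B (the rewrite author's own statement) =====
-- stated objective: alternative
-- what changed: Replaces A's indexed countdown loop that mutates a copied list in place (with a break) by a structural recursion on the reversed list that rebuilds the result by consing, with no indexing, mutation or break.
import Mathlib
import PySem

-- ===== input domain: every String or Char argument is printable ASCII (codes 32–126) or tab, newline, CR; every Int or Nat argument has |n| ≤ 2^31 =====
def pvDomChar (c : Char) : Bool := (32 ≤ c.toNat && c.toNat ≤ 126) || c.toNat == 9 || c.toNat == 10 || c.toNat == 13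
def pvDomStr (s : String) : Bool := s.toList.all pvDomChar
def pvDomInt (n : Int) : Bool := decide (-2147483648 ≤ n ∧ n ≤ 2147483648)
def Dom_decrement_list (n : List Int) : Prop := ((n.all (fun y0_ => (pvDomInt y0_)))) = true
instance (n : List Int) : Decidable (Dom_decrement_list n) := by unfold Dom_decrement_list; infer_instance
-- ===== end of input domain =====

-- B replaces A's indexed countdown loop mutating a copied list (with a break) by a
-- structural recursion on the reversed list; equal results proved for every input.

-- ===== PORT A =====
-- the for-loop with break: state is `result`; indices come from range(len(n)-1, -1, -1)
def pvGoA (result : List Int) : List Int → List Int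
  | [] => result
  | i :: rest =>
    match PySem.List.pyGet? result i with
    | none => result   -- IndexError; unreachable: every index of the range is in bounds
    | some d =>
      if d ≠ 0 then result.set i.toNat (d - 1)          -- result[i] -= 1; break
      else pvGoA (result.set i.toNat 9) rest            -- result[i] = 9  (i ≥ 0 in range, so .set is exact)

def decrement_list (n : List Int) : List Int :=
  pvGoA n (PySem.List.pyRange ((n.length : Int) - 1) (-1) (-1))

-- ===== PORT B =====
def pvDecRev : List Int → List Int
  | [] => []
  | d :: rest => if d = 0 then 9 :: pvDecRev rest else (d - 1) :: rest

def decrement_list_alt (n : List Int) : List Int := (pvDecRev n.reverse).reverse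

-- ===== PRECONDITION & SPEC =====
def Spec_decrement_list (n : List Int) (out : List Int) : Prop := out = decrement_list_alt n
instance (n : List Int) (out : List Int) : Decidable (Spec_decrement_list n out) := by unfold Spec_decrement_list; infer_instance

-- ===== CLAIM (what is proved, stated in full; the proofs are below) =====
def Claim_equal_decrement_list : Prop := ∀ (n : List Int), Dom_decrement_list n → Spec_decrement_list n (decrement_list n)

-- ===== LEMMAS AND PROOFS =====

-- the loop only touches indices < xs.length, so a fixed suffix rides along untouched
theorem pvGoA_append (idxs : List Int) (xs t : List Int)
    (h : ∀ i ∈ idxs, 0 ≤ i ∧ i < (xs.length : Int)) :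
    pvGoA (xs ++ t) idxs = pvGoA xs idxs ++ t := by
  induction idxs generalizing xs with
  | nil => rfl
  | cons i rest ih =>
    obtain ⟨h0, hlt⟩ := h i (by simp)
    have hnat : i.toNat < xs.length := by omega
    have hget : PySem.List.pyGet? (xs ++ t) i = some xs[i.toNat] := by
      rw [PySem.List.pyGet?_of_nonneg _ h0]
      rw [List.getElem?_append_left hnat]
      simp [hnat]
    have hget' : PySem.List.pyGet? xs i = some xs[i.toNat] := by
      rw [PySem.List.pyGet?_of_nonneg _ h0]
      simp [hnat]
    simp only [pvGoA, hget, hget']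
    by_cases hd : xs[i.toNat] = 0
    · rw [if_neg (by simp [hd]), if_neg (by simp [hd]), List.set_append_left _ _ hnat, ih]
      intro j hj
      have := h j (List.mem_cons_of_mem _ hj)
      simpa using this
    · rw [if_pos hd, if_pos hd, List.set_append_left _ _ hnat]

theorem pvMain (n : List Int) : decrement_list n = decrement_list_alt n := by
  induction n using List.reverseRecOn with
  | nil => rfl
  | append_singleton xs d ih =>
    have hlen : ((xs ++ [d]).length : Int) - 1 = (xs.length : Int) := by simp
    have hrange : PySem.List.pyRange (((xs ++ [d]).length : Int) - 1) (-1) (-1)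
        = (xs.length : Int) :: PySem.List.pyRange ((xs.length : Int) - 1) (-1) (-1) := by
      rw [hlen, PySem.List.pyRange_neg_one_cons (by omega)]
    have hget : PySem.List.pyGet? (xs ++ [d]) (xs.length : Int) = some d :=
      PySem.List.pyGet?_append_length xs [] d
    unfold decrement_list
    rw [hrange]
    simp only [pvGoA, hget]
    by_cases hd : d = 0
    · subst hd
      rw [if_neg (show ¬((0:Int) ≠ 0) by simp)]
      have hset : (xs ++ [(0:Int)]).set ((xs.length : Int)).toNat 9 = xs ++ [(9:Int)] := by
        simp
      rw [hset, pvGoA_append]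
      · rw [show pvGoA xs (PySem.List.pyRange ((xs.length : Int) - 1) (-1) (-1)) = decrement_list xs from rfl,
          ih]
        simp [decrement_list_alt, pvDecRev]
      · intro i hi
        rw [PySem.List.mem_pyRange_neg_one] at hi
        omega
    · rw [if_pos hd]
      have hset : (xs ++ [d]).set ((xs.length : Int)).toNat (d - 1) = xs ++ [d - 1] := by
        simp
      rw [hset]
      simp [decrement_list_alt, pvDecRev, hd]

-- ===== VERDICT (by name: the statement is the Claim_ definition above) =====
theorem decrement_list_spec : Claim_equal_decrement_list := by
  intro n _
  exact pvMain n
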